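-- pv_equiv track=rewrite | github.com/mazi76erX2/vault | vault/app/utils.py | get_info_markdown_txt
-- ===== SOURCE A (Python) =====
-- def get_info_markdown_txt(text):
--     """
--     Converts a string containing Q/A pairs into formatted Markdown.
--
--     Parameters:
--     - text (str): The input string containing questions and answers separated by newlines.
--
--     Returns:
--     - str: The formatted Markdown string.
--     """
--     # Split the input string into lines
--     text_list = text.split("\n")
--
--     # Initialize an empty list to store formatted markdown content
--     markdown_content = []
--
--     # Initialize variables to track if we're in an answer block
--     in_answer = False
--     current_answer = []
--
--     # Iterate over the text list to identify Q/A pairs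
--     for line in text_list:
--         stripped_line = line.strip()
--         if stripped_line.startswith("Q:") or stripped_line.startswith("Question:"):
--             # If we encounter a new question, finalize the current answer (if any)
--             if in_answer:
--                 markdown_content.append(" ".join(current_answer))
--                 in_answer = False
--                 current_answer = []
--
--             # Add the question in bold
--             markdown_content.append(f"**{stripped_line}**")
--
--         elif stripped_line.startswith("A:") or stripped_line.startswith("Answer:"):
--             # If it's the start of an answer, set the in_answer flag
--             if in_answer:
--                 # Finalize the previous answer before starting a new one
--                 markdown_content.append(" ".join(current_answer))
--
--             in_answer = True
--             current_answer = [stripped_line]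
--
--         elif in_answer:
--             # If we're in an answer block, append the current line to the answer
--             current_answer.append(stripped_line)
--
--     # Finalize any remaining answer
--     if in_answer:
--         markdown_content.append(" ".join(current_answer))
--         markdown_content.append("---")  # Add a separator after the last answer
--
--     # Join the content with double newlines for proper Markdown formatting
--     return "\n\n".join(markdown_content)
-- ===== SOURCE B (Python) =====
-- def get_info_markdown_txt(text):
--     """
--     Converts a string containing Q/A pairs into formatted Markdown.
--     Two-pass: build tagged blocks, then render them.
--     """
--     blocks = []
--     for line in text.split("\n"):
--         s = line.strip()
--         if s.startswith("Q:") or s.startswith("Question:"):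
--             blocks.append(("Q", s))
--         elif s.startswith("A:") or s.startswith("Answer:"):
--             blocks.append(("A", [s]))
--         elif blocks and blocks[-1][0] == "A":
--             blocks[-1][1].append(s)
--     rendered = ["**" + payload + "**" if tag == "Q" else " ".join(payload)
--                 for tag, payload in blocks]
--     if blocks and blocks[-1][0] == "A":
--         rendered.append("---")
--     return "\n\n".join(rendered)
-- ===== Notes on version B (the rewrite author's own statement) =====
-- stated objective: alternative
-- what changed: Replaces the single-pass state machine (in_answer flag, current_answer accumulator, eager rendering) with a two-pass block model: first build a list of tagged Q/A blocks, then render them and append the trailing separator if the last block is an answer.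
import Mathlib
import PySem

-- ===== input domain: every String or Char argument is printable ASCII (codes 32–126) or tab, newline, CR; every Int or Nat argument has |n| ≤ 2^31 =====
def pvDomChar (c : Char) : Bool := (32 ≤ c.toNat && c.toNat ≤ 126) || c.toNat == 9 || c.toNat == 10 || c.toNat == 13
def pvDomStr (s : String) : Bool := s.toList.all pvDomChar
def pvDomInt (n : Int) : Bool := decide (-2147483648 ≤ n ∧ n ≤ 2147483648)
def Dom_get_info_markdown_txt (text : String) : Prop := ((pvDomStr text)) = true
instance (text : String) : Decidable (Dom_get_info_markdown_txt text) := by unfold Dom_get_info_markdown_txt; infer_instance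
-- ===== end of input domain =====

-- B replaces A's single-pass state machine by a two-pass block model (build tagged blocks, then render); alternative decomposition, same cost.

-- ===== PORT A =====
-- loop body of A; state: (markdown_content, in_answer, current_answer)
def stepA (st : List String × Bool × List String) (line : String) : List String × Bool × List String :=
  let s := PySem.Str.strip line
  if PySem.Str.startswith s "Q:" || PySem.Str.startswith s "Question:" then
    let md := if st.2.1 then st.1 ++ [PySem.Str.join " " st.2.2] else st.1
    (md ++ [PySem.Str.join "" ["**", s, "**"]], false, [])
  else if PySem.Str.startswith s "A:" || PySem.Str.startswith s "Answer:" then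
    let md := if st.2.1 then st.1 ++ [PySem.Str.join " " st.2.2] else st.1
    (md, true, [s])
  else if st.2.1 then (st.1, true, st.2.2 ++ [s])
  else st

-- A's code after the loop: finalize any remaining answer
def finalizeA (st : List String × Bool × List String) : List String :=
  if st.2.1 then st.1 ++ [PySem.Str.join " " st.2.2, "---"] else st.1

def get_info_markdown_txt (text : String) : String :=
  PySem.Str.join "\n\n"
    (finalizeA (((PySem.Str.split? text "\n").getD []).foldl stepA ([], false, [])))

-- ===== PORT B =====
-- tagged block: a question line, or an answer with its continuation lines
inductive Blk where
  | q : String → Blk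
  | a : List String → Blk
deriving DecidableEq, Repr

-- pass 1 loop body; blocks kept in reverse (cons = Python append / mutate last element)
def stepB (rbs : List Blk) (line : String) : List Blk :=
  let s := PySem.Str.strip line
  if PySem.Str.startswith s "Q:" || PySem.Str.startswith s "Question:" then
    Blk.q s :: rbs
  else if PySem.Str.startswith s "A:" || PySem.Str.startswith s "Answer:" then
    Blk.a [s] :: rbs
  else
    match rbs with
    | Blk.a ls :: rest => Blk.a (ls ++ [s]) :: rest
    | _ => rbs

def renderB (b : Blk) : String :=
  match b with
  | .q s => PySem.Str.join "" ["**", s, "**"]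
  | .a ls => PySem.Str.join " " ls

-- pass 2: render the blocks, trailing "---" if the last block is an answer
def renderAll (rbs : List Blk) : List String :=
  match rbs with
  | Blk.a _ :: _ => rbs.reverse.map renderB ++ ["---"]
  | _ => rbs.reverse.map renderB

def get_info_markdown_txt_alt (text : String) : String :=
  PySem.Str.join "\n\n"
    (renderAll (((PySem.Str.split? text "\n").getD []).foldl stepB []))

-- ===== PRECONDITION & SPEC =====
def Spec_get_info_markdown_txt (text : String) (out : String) : Prop := out = get_info_markdown_txt_alt text
instance (text : String) (out : String) : Decidable (Spec_get_info_markdown_txt text out) := by unfold Spec_get_info_markdown_txt; infer_instance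

-- ===== CLAIM (what is proved, stated in full; the proofs are below) =====
def Claim_equal_get_info_markdown_txt : Prop := ∀ (text : String), Dom_get_info_markdown_txt text → Spec_get_info_markdown_txt text (get_info_markdown_txt text)

-- ===== LEMMAS AND PROOFS =====

-- invariant tying A's loop state to B's reversed block list
def InvAB (st : List String × Bool × List String) (rbs : List Blk) : Prop :=
  if st.2.1 then
    ∃ rest, rbs = Blk.a st.2.2 :: rest ∧ st.1 = rest.reverse.map renderB
  else
    st.1 = rbs.reverse.map renderB ∧ ∀ ls rest, rbs ≠ Blk.a ls :: rest

theorem inv_step (st : List String × Bool × List String) (rbs : List Blk) (line : String)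
    (h : InvAB st rbs) : InvAB (stepA st line) (stepB rbs line) := by
  obtain ⟨md, inA, cur⟩ := st
  simp only [stepA, stepB]
  generalize PySem.Str.strip line = s
  by_cases hq : (PySem.Str.startswith s "Q:" || PySem.Str.startswith s "Question:") = true
  · rw [if_pos hq, if_pos hq]
    cases inA with
    | true =>
      obtain ⟨rest, hr, hm⟩ := h
      subst hr; subst hm
      unfold InvAB
      refine ⟨?_, fun ls rest' h' => by simp at h'⟩
      simp [renderB]
    | false =>
      obtain ⟨hm, _⟩ := h
      subst hm
      unfold InvAB
      refine ⟨?_, fun ls rest' h' => by simp at h'⟩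
      simp [renderB]
  · rw [if_neg hq, if_neg hq]
    by_cases ha : (PySem.Str.startswith s "A:" || PySem.Str.startswith s "Answer:") = true
    · rw [if_pos ha, if_pos ha]
      cases inA with
      | true =>
        obtain ⟨rest, hr, hm⟩ := h
        subst hr; subst hm
        exact ⟨Blk.a cur :: rest, rfl, by simp [renderB]⟩
      | false =>
        exact ⟨rbs, rfl, h.1⟩
    · rw [if_neg ha, if_neg ha]
      cases inA with
      | true =>
        obtain ⟨rest, hr, hm⟩ := h
        subst hr
        rw [if_pos rfl]
        exact ⟨rest, rfl, hm⟩
      | false =>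
        obtain ⟨hm, hne⟩ := h
        rw [if_neg (by simp)]
        match rbs with
        | [] => exact ⟨hm, hne⟩
        | Blk.q s' :: rest => exact ⟨hm, hne⟩
        | Blk.a ls :: rest => exact absurd rfl (hne ls rest)

theorem inv_foldl (lines : List String) (st : List String × Bool × List String)
    (rbs : List Blk) (h : InvAB st rbs) :
    InvAB (lines.foldl stepA st) (lines.foldl stepB rbs) := by
  induction lines generalizing st rbs with
  | nil => exact h
  | cons l ls ih =>
    rw [List.foldl_cons, List.foldl_cons]
    exact ih _ _ (inv_step st rbs l h)

theorem finalize_eq (st : List String × Bool × List String) (rbs : List Blk)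
    (h : InvAB st rbs) : finalizeA st = renderAll rbs := by
  unfold finalizeA renderAll
  by_cases hin : st.2.1 = true
  · rw [if_pos hin]
    rw [InvAB, if_pos hin] at h
    obtain ⟨rest, hr, hm⟩ := h
    subst hr; rw [hm]
    simp [renderB]
  · rw [if_neg hin]
    rw [InvAB, if_neg hin] at h
    obtain ⟨hm, hne⟩ := h
    rw [hm]
    match rbs with
    | [] => rfl
    | Blk.q s' :: rest => rfl
    | Blk.a ls :: rest => exact absurd rfl (hne ls rest)

-- ===== VERDICT (by name: the statement is the Claim_ definition above) =====
theorem get_info_markdown_txt_spec : Claim_equal_get_info_markdown_txt := by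
  intro text _
  unfold Spec_get_info_markdown_txt get_info_markdown_txt get_info_markdown_txt_alt
  rw [finalize_eq _ _ (inv_foldl _ ([], false, []) []
    ⟨rfl, fun ls rest h => by simp at h⟩)]
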